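-- pv_equiv track=rewrite | github.com/beczkowb/algorithms | positional_notation.py | to_decimal_horner
-- ===== SOURCE A (Python) =====
-- def to_decimal_horner(number, p, i=None):
--     if i is None:
--         number = str(number)
--         number = [int(x) for x in number]
--         i = len(number) - 1
--
--     if i == 0:
--         return number[i]
--     else:
--         return p*to_decimal_horner(number, p, i-1) + number[i]
-- ===== SOURCE B (Python) =====
-- def to_decimal_horner(number, p, i=None):
--     if i is None:
--         number = str(number)
--         number = [int(x) for x in number]
--         i = len(number) - 1
--     result = number[0]
--     for k in range(1, i + 1):
--         result = result * p + number[k]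
--     return result
-- ===== Notes on version B (the rewrite author's own statement) =====
-- stated objective: simpler
-- what changed: Replaces the high-to-low recursive call chain with a flat iterative Horner loop over an accumulator (result = result*p + digit), same bootstrap.
import Mathlib
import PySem

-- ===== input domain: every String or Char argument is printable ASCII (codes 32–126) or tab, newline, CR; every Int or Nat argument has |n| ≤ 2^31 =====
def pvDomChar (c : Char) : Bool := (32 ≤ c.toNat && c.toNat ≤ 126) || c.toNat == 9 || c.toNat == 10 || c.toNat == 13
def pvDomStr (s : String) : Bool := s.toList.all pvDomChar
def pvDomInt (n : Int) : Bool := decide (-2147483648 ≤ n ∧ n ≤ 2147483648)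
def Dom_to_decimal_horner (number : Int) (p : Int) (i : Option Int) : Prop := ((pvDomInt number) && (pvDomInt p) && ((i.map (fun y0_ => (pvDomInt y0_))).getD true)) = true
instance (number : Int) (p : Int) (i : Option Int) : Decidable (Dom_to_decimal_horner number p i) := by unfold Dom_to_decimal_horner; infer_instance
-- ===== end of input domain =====

-- B replaces A's recursive call chain with a flat iterative Horner loop (simpler, O(1) stack).
-- ===== PORT A =====
-- shared bootstrap of BOTH Pythons: number = [int(x) for x in str(number)]
-- (int(x) per char; exact under Pre_: number ≥ 0 so every char is a digit and int never raises)
def pyDigits (number : Int) : List Int :=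
  (PySem.Int.toChars number).map (fun c => (PySem.Int.ofChars? [c]).getD 0)

-- A's recursion on the index i (Nat fuel = the index itself; number[i] in range under Pre_)
def hornerRecA (digits : List Int) (p : Int) : Nat → Int
  | 0 => PySem.List.pyGetD digits (0 : Int) 0
  | n + 1 => p * hornerRecA digits p n + PySem.List.pyGetD digits ((n : Int) + 1) 0

def to_decimal_horner (number : Int) (p : Int) (i : Option Int) : Int :=
  match i with
  | some _ => 0   -- Python raises TypeError here (indexing an int); excluded by Pre_
  | none =>
      let ds := pyDigits number
      hornerRecA ds p (ds.length - 1)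

-- ===== PORT B =====
def to_decimal_horner_alt (number : Int) (p : Int) (i : Option Int) : Int :=
  match i with
  | some _ => 0   -- B's Python also raises TypeError here; excluded by Pre_
  | none =>
      let ds := pyDigits number
      let iv : Int := (ds.length : Int) - 1
      (PySem.List.pyRange 1 (iv + 1) 1).foldl
        (fun result k => result * p + PySem.List.pyGetD ds k 0)
        (PySem.List.pyGetD ds (0 : Int) 0)

-- ===== PRECONDITION & SPEC =====
-- Pre_ excludes exactly where A raises: i ≠ None (TypeError: the int is indexed) and
-- negative number (ValueError: int('-') on the sign character).
def Pre_to_decimal_horner (number : Int) (p : Int) (i : Option Int) : Prop :=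
  i = none ∧ 0 ≤ number
instance (number : Int) (p : Int) (i : Option Int) : Decidable (Pre_to_decimal_horner number p i) := by
  unfold Pre_to_decimal_horner; infer_instance
def pvWitness_to_decimal_horner : Int × Int × Option Int := (423, 10, none)

def Spec_to_decimal_horner (number : Int) (p : Int) (i : Option Int) (out : Int) : Prop := out = to_decimal_horner_alt number p i
instance (number : Int) (p : Int) (i : Option Int) (out : Int) : Decidable (Spec_to_decimal_horner number p i out) := by unfold Spec_to_decimal_horner; infer_instance

-- ===== CLAIM (what is proved, stated in full; the proofs are below) =====
def Claim_equal_to_decimal_horner : Prop := ∀ (number : Int) (p : Int) (i : Option Int), Dom_to_decimal_horner number p i → Pre_to_decimal_horner number p i → Spec_to_decimal_horner number p i (to_decimal_horner number p i)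

-- ===== LEMMAS AND PROOFS =====
-- B's left fold over range(1, n+1) computes A's recursion on the index n, for any digit list.
lemma fold_eq_hornerRecA (ds : List Int) (p : Int) : ∀ n : Nat,
    (PySem.List.pyRange 1 ((n : Int) + 1) 1).foldl
      (fun result k => result * p + PySem.List.pyGetD ds k 0)
      (PySem.List.pyGetD ds (0 : Int) 0) = hornerRecA ds p n := by
  intro n
  induction n with
  | zero => simp [PySem.List.pyRange_one_eq_nil, hornerRecA]
  | succ n ih =>
      have h : ((n + 1 : Nat) : Int) + 1 = ((n : Int) + 1) + 1 := by push_cast; ring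
      rw [h, PySem.List.pyRange_one_succ_right (by omega), List.foldl_append]
      simp only [List.foldl, ih, hornerRecA]
      ring


-- ===== VERDICT (by name: the statement is the Claim_ definition above) =====
theorem to_decimal_horner_spec : Claim_equal_to_decimal_horner := by
  intro number p i _ hpre
  obtain ⟨hi, _⟩ := hpre
  subst hi
  unfold Spec_to_decimal_horner to_decimal_horner to_decimal_horner_alt
  simp only []
  set ds := pyDigits number with hds
  rcases ds with _ | ⟨d, rest⟩
  · simpa using (fold_eq_hornerRecA [] p 0).symm
  · have hlen : ((d :: rest).length : Int) - 1 + 1 = (((d :: rest).length - 1 : Nat) : Int) + 1 := by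
      simp [List.length_cons]
    rw [hlen, fold_eq_hornerRecA]
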